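-- pv_equiv track=rewrite | github.com/hacetheworld/competitive-programming-practices | problems/atcoder/dp/L_Deque.py | helper
-- ===== SOURCE A (Python) =====
-- def helper(arr, n, i, j, dp):
--     if i >= n or j < 0 or i > j:
--         return 0
--     if dp[i][j] != -1:
--         return dp[i][j]
--     left = arr[i]+min(helper(arr, n, i+2, j, dp), helper(arr, n, i+1, j-1, dp))
--     right = arr[j]+min(helper(arr, n, i, j-2, dp),
--                        helper(arr, n, i+1, j-1, dp))
--     ans = max(left, right)
--     dp[i][j] = ans
--     return ans
-- ===== SOURCE B (Python) =====
-- def helper(arr, n, i, j, dp):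
--     if i >= n or j < 0 or i > j:
--         return 0
--     g = {}
--
--     def val(a, b):
--         if a >= n or b < 0 or a > b:
--             return 0
--         return g[(a, b)]
--
--     for a in range(j, i - 1, -1):
--         if a >= n:
--             continue
--         row = dp[a]
--         for b in range(a, j + 1):
--             cur = row[b]
--             if cur != -1:
--                 g[(a, b)] = cur
--             else:
--                 g[(a, b)] = max(arr[a] + min(val(a + 2, b), val(a + 1, b - 1)),
--                                 arr[b] + min(val(a, b - 2), val(a + 1, b - 1)))
--     return g[(i, j)]
-- ===== Notes on version B (the rewrite author's own statement) =====
-- stated objective: alternative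
-- what changed: A's memoised top-down recursion (which writes its results into dp in place and threads the mutated table through four recursive calls) is replaced by an iterative bottom-up interval DP: a double loop fills a fresh dictionary keyed by (a,b) from the shortest intervals up and never mutates dp.
-- outside the precondition, e.g. on helper([3], 2, -1, 1, [[2, 1]]): A returns 1, B raises IndexError; on helper([3], 4, 0, 1, [[4, 2]]): A returns 2, B raises IndexError
import Mathlib
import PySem

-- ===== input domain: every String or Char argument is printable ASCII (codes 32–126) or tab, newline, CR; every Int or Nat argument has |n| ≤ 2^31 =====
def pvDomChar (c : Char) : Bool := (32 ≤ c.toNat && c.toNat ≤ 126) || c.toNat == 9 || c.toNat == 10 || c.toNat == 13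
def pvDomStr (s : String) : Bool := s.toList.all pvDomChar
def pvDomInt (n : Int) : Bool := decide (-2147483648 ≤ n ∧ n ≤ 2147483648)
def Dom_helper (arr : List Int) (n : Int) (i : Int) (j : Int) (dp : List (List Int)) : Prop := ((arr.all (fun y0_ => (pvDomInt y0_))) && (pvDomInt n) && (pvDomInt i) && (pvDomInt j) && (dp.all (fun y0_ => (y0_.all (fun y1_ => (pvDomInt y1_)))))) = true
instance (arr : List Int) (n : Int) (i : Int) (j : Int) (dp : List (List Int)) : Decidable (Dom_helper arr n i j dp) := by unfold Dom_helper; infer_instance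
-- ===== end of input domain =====

-- B replaces A's memoised recursion by an iterative bottom-up interval-DP table (alternative
-- decomposition, same cost class); equivalence is about the RETURN value only: A writes its
-- memo results into dp in place, B never mutates dp.

-- ===== PORT A =====
-- dp[i][j] read; the default -1 is only reached outside Pre_helper (Python raises there)
def pvReadCell (dp : List (List Int)) (i j : Int) : Int :=
  (((PySem.List.pyGet? dp i).bind (fun r => PySem.List.pyGet? r j)).getD (-1))
def pvSetCell (dp : List (List Int)) (i j : Int) (v : Int) : List (List Int) :=
  dp.set i.toNat ((dp.getD i.toNat []).set j.toNat v)

-- arr[k]; the default 0 is only reached outside Pre_helper (Python raises there)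
-- dp[i][j] = v; exact for the nonnegative in-range writes A performs under Pre_helper
def pvArrGet (arr : List Int) (k : Int) : Int := (PySem.List.pyGet? arr k).getD 0

-- A threads the dp it mutates through its four recursive calls in Python's evaluation order.
-- The recursion is totalised by structural fuel; fuel = (j - i + 2).toNat bounds the
-- recursion depth measure, so the fuel-out branch is never reached from helper.
def helperA (fuel : Nat) (arr : List Int) (n i j : Int) (dp : List (List Int)) : Int × List (List Int) :=
  match fuel with
  | 0 => (0, dp)
  | m + 1 =>
    if n ≤ i ∨ j < 0 ∨ j < i then (0, dp)
    else
      let cur := pvReadCell dp i j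
      if cur ≠ -1 then (cur, dp)
      else
        let r1 := helperA m arr n (i+2) j dp
        let r2 := helperA m arr n (i+1) (j-1) r1.2
        let r3 := helperA m arr n i (j-2) r2.2
        let r4 := helperA m arr n (i+1) (j-1) r3.2
        let left := pvArrGet arr i + min r1.1 r2.1
        let right := pvArrGet arr j + min r3.1 r4.1
        let ans := max left right
        (ans, pvSetCell r4.2 i j ans)

def helper (arr : List Int) (n : Int) (i : Int) (j : Int) (dp : List (List Int)) : Int :=
  (helperA ((j - i + 2).toNat) arr n i j dp).1

-- ===== PORT B =====
-- Source B's val(a, b): 0 on out-of-game pairs, else the table entry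
-- (the default 0 is never reached: Source B only looks up keys it has already stored)
def pvVal (g : PySem.Dict (Int × Int) Int) (n a b : Int) : Int :=
  if n ≤ a ∨ b < 0 ∨ b < a then 0 else g.getD (a, b) 0

-- Source B's inner loop: for b in range(a, j+1) fill g[(a, b)]
-- (row[b] with default -1 is only reached outside Pre_helper, where Python raises)
def pvInnerLoop (arr : List Int) (n j : Int) (row : List Int) (a : Int)
    (g : PySem.Dict (Int × Int) Int) : PySem.Dict (Int × Int) Int :=
  (PySem.List.pyRange a (j+1) 1).foldl (fun g b =>
    let cur := (PySem.List.pyGet? row b).getD (-1)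
    if cur ≠ -1 then g.insert (a, b) cur
    else g.insert (a, b)
      (max (pvArrGet arr a + min (pvVal g n (a+2) b) (pvVal g n (a+1) (b-1)))
           (pvArrGet arr b + min (pvVal g n a (b-2)) (pvVal g n (a+1) (b-1))))) g

def helper_alt (arr : List Int) (n : Int) (i : Int) (j : Int) (dp : List (List Int)) : Int :=
  if n ≤ i ∨ j < 0 ∨ j < i then 0
  else
    let g := (PySem.List.pyRange j (i-1) (-1)).foldl (fun g a =>
      if n ≤ a then g
      else pvInnerLoop arr n j ((PySem.List.pyGet? dp a).getD []) a g)
      PySem.Dict.empty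
    g.getD (i, j) 0

-- ===== PRECONDITION & SPEC =====
-- Pre_helper restricts to the helper's natural domain: every base-case triple is admitted;
-- otherwise i must be nonnegative (a negative i makes Python wrap around arr and dp) and arr
-- and dp must be large enough for indices up to j (otherwise A raises IndexError).
def Pre_helper (arr : List Int) (n : Int) (i : Int) (j : Int) (dp : List (List Int)) : Prop :=
  (n ≤ i ∨ j < 0 ∨ j < i) ∨
  (0 ≤ i ∧ j < (arr.length : Int) ∧ j < (dp.length : Int) ∧ ∀ row ∈ dp, j < (row.length : Int))
instance (arr : List Int) (n : Int) (i : Int) (j : Int) (dp : List (List Int)) : Decidable (Pre_helper arr n i j dp) := by unfold Pre_helper; infer_instance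

def pvWitness_helper : List Int × Int × Int × Int × List (List Int) := ([5, 3], 2, 0, 1, [[-1, -1], [-1, -1]])

def Spec_helper (arr : List Int) (n : Int) (i : Int) (j : Int) (dp : List (List Int)) (out : Int) : Prop := out = helper_alt arr n i j dp
instance (arr : List Int) (n : Int) (i : Int) (j : Int) (dp : List (List Int)) (out : Int) : Decidable (Spec_helper arr n i j dp out) := by unfold Spec_helper; infer_instance

-- ===== CLAIM (what is proved, stated in full; the proofs are below) =====
def Claim_equal_helper : Prop := ∀ (arr : List Int) (n : Int) (i : Int) (j : Int) (dp : List (List Int)), Dom_helper arr n i j dp → Pre_helper arr n i j dp → Spec_helper arr n i j dp (helper arr n i j dp)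

-- ===== LEMMAS AND PROOFS =====

theorem readCell_nonneg (dp : List (List Int)) (a b : Int) (h0a : 0 ≤ a) (h0b : 0 ≤ b) :
    pvReadCell dp a b = ((dp[a.toNat]?.getD [])[b.toNat]?).getD (-1) := by
  unfold pvReadCell
  rw [PySem.List.pyGet?_of_nonneg _ h0a]
  cases h : dp[a.toNat]? with
  | none => simp [PySem.List.pyGet?]
  | some r => simp [PySem.List.pyGet?_of_nonneg _ h0b]

theorem read_setCell_ne (dp : List (List Int)) (i j v a b : Int)
    (h0a : 0 ≤ a) (h0b : 0 ≤ b) (h0i : 0 ≤ i) (h0j : 0 ≤ j) (hne : a ≠ i ∨ b ≠ j) :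
    pvReadCell (pvSetCell dp i j v) a b = pvReadCell dp a b := by
  rw [readCell_nonneg _ _ _ h0a h0b, readCell_nonneg _ _ _ h0a h0b]
  unfold pvSetCell
  rw [List.getElem?_set]
  split_ifs with h1 h2
  · have hbj : b ≠ j := by rcases hne with h | h; · omega
                           · exact h
    simp only [Option.getD_some]
    rw [List.getElem?_set_ne (by omega)]
    rw [List.getD, ← h1]
  · rw [show dp[a.toNat]? = none from List.getElem?_eq_none_iff.mpr (by omega)]
  · rfl

theorem read_setCell_self_or (dp : List (List Int)) (i j v : Int) (h0i : 0 ≤ i) (h0j : 0 ≤ j) :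
    pvReadCell (pvSetCell dp i j v) i j = v ∨
    pvReadCell (pvSetCell dp i j v) i j = pvReadCell dp i j := by
  rw [readCell_nonneg _ _ _ h0i h0j, readCell_nonneg _ _ _ h0i h0j]
  unfold pvSetCell
  rw [List.getElem?_set, if_pos rfl]
  by_cases h1 : i.toNat < dp.length
  · rw [if_pos h1]
    simp only [Option.getD_some]
    by_cases h2 : j.toNat < (dp.getD i.toNat []).length
    · left; rw [List.getElem?_set_self h2]; rfl
    · right
      rw [List.set_eq_of_length_le (by omega)]
      rw [List.getD, List.getElem?_eq_getElem h1]
  · rw [if_neg h1]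
    right
    rw [show dp[i.toNat]? = none from List.getElem?_eq_none_iff.mpr (by omega)]

-- the pure value of A's recursion relative to the INITIAL dp (no memo writes)
def pvF (arr : List Int) (n i j : Int) (dp : List (List Int)) : Int :=
  if _h : n ≤ i ∨ j < 0 ∨ j < i then 0
  else
    let cur := pvReadCell dp i j
    if cur ≠ -1 then cur
    else max (pvArrGet arr i + min (pvF arr n (i+2) j dp) (pvF arr n (i+1) (j-1) dp))
             (pvArrGet arr j + min (pvF arr n i (j-2) dp) (pvF arr n (i+1) (j-1) dp))
termination_by (j - i + 2).toNat
decreasing_by all_goals omega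

def pvInv (arr : List Int) (n : Int) (dp0 dp : List (List Int)) : Prop :=
  ∀ a b : Int, 0 ≤ a → 0 ≤ b →
    pvReadCell dp a b = pvReadCell dp0 a b ∨
    (pvReadCell dp0 a b = -1 ∧ pvReadCell dp a b = pvF arr n a b dp0)

theorem pvF_base (arr : List Int) (n i j : Int) (dp : List (List Int))
    (h : n ≤ i ∨ j < 0 ∨ j < i) : pvF arr n i j dp = 0 := by
  rw [pvF, dif_pos h]

theorem pvF_rec (arr : List Int) (n i j : Int) (dp : List (List Int))
    (h : ¬ (n ≤ i ∨ j < 0 ∨ j < i)) (hc : pvReadCell dp i j = -1) :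
    pvF arr n i j dp =
      max (pvArrGet arr i + min (pvF arr n (i+2) j dp) (pvF arr n (i+1) (j-1) dp))
          (pvArrGet arr j + min (pvF arr n i (j-2) dp) (pvF arr n (i+1) (j-1) dp)) := by
  rw [pvF, dif_neg h]
  simp [hc]

theorem pvF_memo (arr : List Int) (n i j : Int) (dp : List (List Int))
    (h : ¬ (n ≤ i ∨ j < 0 ∨ j < i)) (hc : pvReadCell dp i j ≠ -1) :
    pvF arr n i j dp = pvReadCell dp i j := by
  rw [pvF, dif_neg h]
  simp [hc]

theorem helperA_eq_F (arr : List Int) (n : Int) (dp0 : List (List Int)) :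
    ∀ (m : Nat) (i j : Int) (dp : List (List Int)), (j - i + 2).toNat ≤ m → 0 ≤ i →
    pvInv arr n dp0 dp →
    (helperA m arr n i j dp).1 = pvF arr n i j dp0 ∧ pvInv arr n dp0 (helperA m arr n i j dp).2 := by
  intro m
  induction m with
  | zero =>
    intro i j dp hm h0 hInv
    have hb : n ≤ i ∨ j < 0 ∨ j < i := by omega
    rw [pvF_base _ _ _ _ _ hb]
    exact ⟨rfl, hInv⟩
  | succ m ih =>
    intro i j dp hm h0 hInv
    by_cases hb : n ≤ i ∨ j < 0 ∨ j < i
    · rw [helperA, if_pos hb, pvF_base _ _ _ _ _ hb]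
      exact ⟨rfl, hInv⟩
    · have h0j : 0 ≤ j := by omega
      rw [helperA, if_neg hb]
      by_cases hcur : pvReadCell dp i j = -1
      · simp only [ne_eq, hcur, not_true_eq_false, if_false]
        have hc0 : pvReadCell dp0 i j = -1 := by
          rcases hInv i j h0 h0j with hc | ⟨hc0, _⟩
          · rw [← hc]; exact hcur
          · exact hc0
        obtain ⟨e1, I1⟩ := ih (i+2) j dp (by omega) (by omega) hInv
        obtain ⟨e2, I2⟩ := ih (i+1) (j-1) _ (by omega) (by omega) I1
        obtain ⟨e3, I3⟩ := ih i (j-2) _ (by omega) h0 I2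
        obtain ⟨e4, I4⟩ := ih (i+1) (j-1) _ (by omega) (by omega) I3
        rw [e1, e2, e3, e4, ← pvF_rec arr n i j dp0 hb hc0]
        refine ⟨rfl, ?_⟩
        intro a b ha hb'
        by_cases hab : a = i ∧ b = j
        · obtain ⟨rfl, rfl⟩ := hab
          rcases read_setCell_self_or _ a b (pvF arr n a b dp0) ha hb' with hset | hset
          · exact Or.inr ⟨hc0, hset⟩
          · rw [hset]
            exact I4 a b ha hb'
        · rw [read_setCell_ne _ _ _ _ _ _ ha hb' h0 h0j (by tauto)]
          exact I4 a b ha hb'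
      · simp only [ne_eq, hcur, not_false_eq_true, if_true]
        rcases hInv i j h0 h0j with hc | ⟨hc0, hcF⟩
        · refine ⟨?_, hInv⟩
          rw [pvF_memo arr n i j dp0 hb (by rw [← hc]; exact hcur), ← hc]
        · exact ⟨hcF, hInv⟩

def pvInnerInv (arr : List Int) (n j : Int) (dp : List (List Int))
    (g : PySem.Dict (Int × Int) Int) (a b0 : Int) : Prop :=
  ∀ x y : Int, g.get? (x, y) =
    if (a + 1 ≤ x ∧ x ≤ j ∧ x ≤ y ∧ y ≤ j ∧ x < n) ∨ (x = a ∧ a ≤ y ∧ y ≤ j ∧ y < b0)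
    then some (pvF arr n x y dp) else none

def pvOuterInv (arr : List Int) (n j : Int) (dp : List (List Int))
    (g : PySem.Dict (Int × Int) Int) (lo : Int) : Prop :=
  ∀ x y : Int, g.get? (x, y) =
    if lo ≤ x ∧ x ≤ j ∧ x ≤ y ∧ y ≤ j ∧ x < n
    then some (pvF arr n x y dp) else none

theorem rowRead_eq (dp : List (List Int)) (a b : Int) :
    ((PySem.List.pyGet? ((PySem.List.pyGet? dp a).getD []) b).getD (-1)) = pvReadCell dp a b := by
  unfold pvReadCell
  cases h : PySem.List.pyGet? dp a with
  | none => simp [PySem.List.pyGet?]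
  | some r => simp

theorem val_of_innerInv (arr : List Int) (n j : Int) (dp : List (List Int))
    (g : PySem.Dict (Int × Int) Int) (a b0 : Int) (hg : pvInnerInv arr n j dp g a b0)
    (x y : Int)
    (hr : ¬ (n ≤ x ∨ y < 0 ∨ y < x) →
      (a + 1 ≤ x ∧ x ≤ j ∧ x ≤ y ∧ y ≤ j ∧ x < n) ∨ (x = a ∧ a ≤ y ∧ y ≤ j ∧ y < b0)) :
    pvVal g n x y = pvF arr n x y dp := by
  unfold pvVal
  split_ifs with h
  · rw [pvF_base _ _ _ _ _ h]
  · rw [PySem.Dict.getD_eq_get?_getD, hg x y, if_pos (hr h)]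
    rfl

theorem inner_lemma (arr : List Int) (n i j : Int) (dp : List (List Int)) (a : Int)
    (h0i : 0 ≤ i) (hia : i ≤ a) (haj : a ≤ j) (hna : ¬ n ≤ a) :
    ∀ (m : Nat) (b : Int) (g : PySem.Dict (Int × Int) Int), (j + 1 - b).toNat ≤ m → a ≤ b →
    pvInnerInv arr n j dp g a b →
    pvInnerInv arr n j dp
      ((PySem.List.pyRange b (j+1) 1).foldl (fun g b =>
        let cur := (PySem.List.pyGet? ((PySem.List.pyGet? dp a).getD []) b).getD (-1)
        if cur ≠ -1 then g.insert (a, b) cur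
        else g.insert (a, b)
          (max (pvArrGet arr a + min (pvVal g n (a+2) b) (pvVal g n (a+1) (b-1)))
               (pvArrGet arr b + min (pvVal g n a (b-2)) (pvVal g n (a+1) (b-1))))) g)
      a (j + 1) := by
  intro m
  induction m with
  | zero =>
    intro b g hm hab hg
    rw [PySem.List.pyRange_one_eq_nil (by omega), List.foldl_nil]
    intro x y
    rw [hg x y]
    exact if_congr (by omega) rfl rfl
  | succ m ih =>
    intro b g hm hab hg
    by_cases hbj : j + 1 ≤ b
    · rw [PySem.List.pyRange_one_eq_nil (by omega), List.foldl_nil]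
      intro x y
      rw [hg x y]
      exact if_congr (by omega) rfl rfl
    · rw [PySem.List.pyRange_one_cons (by omega), List.foldl_cons]
      -- the value stored for (a, b) is pvF arr n a b dp
      have hnb : ¬ (n ≤ a ∨ b < 0 ∨ b < a) := by omega
      have hrow : ((PySem.List.pyGet? ((PySem.List.pyGet? dp a).getD []) b).getD (-1))
          = pvReadCell dp a b := rowRead_eq dp a b
      have hstep : ∀ w, w = pvF arr n a b dp →
          pvInnerInv arr n j dp (g.insert (a, b) w) a (b + 1) := by
        intro w hw x y
        rw [PySem.Dict.get?_insert, hg x y]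
        by_cases hxy : (x, y) = (a, b)
        · rw [if_pos hxy]
          obtain ⟨rfl, rfl⟩ : x = a ∧ y = b := by simpa [Prod.ext_iff] using hxy
          rw [if_pos (by omega), hw]
        · have hne : x ≠ a ∨ y ≠ b := by
            by_cases hx : x = a
            · exact Or.inr (fun hy => hxy (by rw [hx, hy]))
            · exact Or.inl hx
          rw [if_neg hxy]
          exact if_congr (by omega) rfl rfl
      have hmain : pvInnerInv arr n j dp
          ((fun g b =>
            let cur := (PySem.List.pyGet? ((PySem.List.pyGet? dp a).getD []) b).getD (-1)
            if cur ≠ -1 then g.insert (a, b) cur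
            else g.insert (a, b)
              (max (pvArrGet arr a + min (pvVal g n (a+2) b) (pvVal g n (a+1) (b-1)))
                   (pvArrGet arr b + min (pvVal g n a (b-2) ) (pvVal g n (a+1) (b-1))))) g b) a (b + 1) := by
        simp only [ne_eq, hrow]
        split_ifs with hcur
        · apply hstep
          rw [pvF_rec arr n a b dp hnb hcur]
          rw [val_of_innerInv arr n j dp g a b hg (a+2) b (by omega),
              val_of_innerInv arr n j dp g a b hg (a+1) (b-1) (by omega),
              val_of_innerInv arr n j dp g a b hg a (b-2) (by omega)]
        · exact hstep _ (by rw [pvF_memo arr n a b dp hnb hcur])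
      exact ih (b+1) _ (by omega) (by omega) hmain

theorem outer_lemma (arr : List Int) (n i j : Int) (dp : List (List Int)) (h0i : 0 ≤ i) :
    ∀ (m : Nat) (a : Int) (g : PySem.Dict (Int × Int) Int), (a - i + 1).toNat ≤ m →
    i - 1 ≤ a → a ≤ j → pvOuterInv arr n j dp g (a + 1) →
    pvOuterInv arr n j dp
      ((PySem.List.pyRange a (i-1) (-1)).foldl (fun g a =>
        if n ≤ a then g
        else pvInnerLoop arr n j ((PySem.List.pyGet? dp a).getD []) a g) g)
      i := by
  intro m
  induction m with
  | zero =>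
    intro a g hm hia haj hg
    rw [PySem.List.pyRange_neg_one_eq_nil (by omega), List.foldl_nil]
    intro x y
    rw [hg x y]
    exact if_congr (by omega) rfl rfl
  | succ m ih =>
    intro a g hm hia haj hg
    by_cases hlast : a ≤ i - 1
    · rw [PySem.List.pyRange_neg_one_eq_nil (by omega), List.foldl_nil]
      intro x y
      rw [hg x y]
      exact if_congr (by omega) rfl rfl
    · rw [PySem.List.pyRange_neg_one_cons (by omega), List.foldl_cons]
      have hstep : pvOuterInv arr n j dp
          ((fun g a => if n ≤ a then g
            else pvInnerLoop arr n j ((PySem.List.pyGet? dp a).getD []) a g) g a) a := by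
        by_cases hna : n ≤ a
        · simp only [if_pos hna]
          intro x y
          rw [hg x y]
          exact if_congr (by omega) rfl rfl
        · simp only [if_neg hna]
          unfold pvInnerLoop
          have hstart : pvInnerInv arr n j dp g a a := by
            intro x y
            rw [hg x y]
            exact if_congr (by omega) rfl rfl
          have hres := inner_lemma arr n i j dp a h0i (by omega) haj hna
            ((j + 1 - a).toNat) a g le_rfl le_rfl hstart
          intro x y
          rw [hres x y]
          exact if_congr (by omega) rfl rfl
      have hgoal := ih (a - 1) _ (by omega) (by omega) (by omega)
        (by rw [show a - 1 + 1 = a by omega]; exact hstep)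
      exact hgoal

theorem helper_alt_eq_F (arr : List Int) (n i j : Int) (dp : List (List Int))
    (hb : ¬ (n ≤ i ∨ j < 0 ∨ j < i)) (h0i : 0 ≤ i) :
    helper_alt arr n i j dp = pvF arr n i j dp := by
  have hempty : pvOuterInv arr n j dp PySem.Dict.empty (j + 1) := by
    intro x y
    rw [PySem.Dict.get?_empty, if_neg (by omega)]
  have hout := outer_lemma arr n i j dp h0i ((j - i + 1).toNat) j PySem.Dict.empty
    le_rfl (by omega) le_rfl hempty
  unfold helper_alt
  rw [if_neg hb]
  simp only [PySem.Dict.getD_eq_get?_getD]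
  rw [hout (i, j).1 (i, j).2]
  rw [if_pos (by omega)]
  rfl

-- ===== VERDICT (by name: the statement is the Claim_ definition above) =====
theorem helper_spec : Claim_equal_helper := by
  intro arr n i j dp _dom hpre
  unfold Spec_helper
  by_cases hb : n ≤ i ∨ j < 0 ∨ j < i
  · unfold helper helper_alt
    cases hf : (j - i + 2).toNat with
    | zero => rw [if_pos hb]; rfl
    | succ m => rw [helperA, if_pos hb]; rw [if_pos hb]
  · have h0i : 0 ≤ i := by
      rcases hpre with h | h
      · exact absurd h hb
      · exact h.1
    have hA := (helperA_eq_F arr n dp ((j - i + 2).toNat) i j dp le_rfl h0i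
      (fun a b _ _ => Or.inl rfl)).1
    unfold helper
    rw [hA, helper_alt_eq_F arr n i j dp hb h0i]
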